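-- pv_equiv track=rewrite | github.com/DINNIESHAY/informatics-ege | task_5/274.py | f
-- ===== SOURCE A (Python) =====
-- def f(n):
--     s = list(map(int, str(n)))
--     s1 = 0
--     for a in s:
--         if a % 2 == 0:
--             s1 += a
--     d = str(n)
--     s2 = sum(map(int, d[::2]))
--     return abs(s1 - s2)
-- ===== SOURCE B (Python) =====
-- def f(n):
--     s1 = 0
--     s2 = 0
--     for i, ch in enumerate(str(n)):
--         v = int(ch)
--         if v % 2 == 0:
--             s1 += v
--         if i % 2 == 0:
--             s2 += v
--     return abs(s1 - s2)
-- ===== Notes on version B (the rewrite author's own statement) =====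
-- stated objective: simpler
-- what changed: B makes a single pass over enumerate(str(n)) keeping two running sums (even-valued digits, even-indexed digits) instead of A's two separate passes (a loop over the digit list plus a comprehension over the d[::2] slice).
import Mathlib
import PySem

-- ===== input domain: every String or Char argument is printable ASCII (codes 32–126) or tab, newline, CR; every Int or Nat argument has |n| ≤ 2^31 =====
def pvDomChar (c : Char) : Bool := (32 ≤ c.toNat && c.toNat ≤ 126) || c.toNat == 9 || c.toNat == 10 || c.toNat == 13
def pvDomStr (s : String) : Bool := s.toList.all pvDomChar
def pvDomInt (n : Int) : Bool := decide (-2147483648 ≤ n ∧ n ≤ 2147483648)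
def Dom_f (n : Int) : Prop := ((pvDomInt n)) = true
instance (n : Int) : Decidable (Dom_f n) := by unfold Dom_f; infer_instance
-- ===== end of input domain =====

-- B: one pass over enumerate(str(n)) with two running sums, replacing A's two passes (digit loop + d[::2] slice sum).


-- ===== PORT A =====
-- int(c) for a single character; under Pre_f every character of str(n) is a digit, so ofChars? is some
def chInt (c : Char) : Int := (PySem.Int.ofChars? [c]).getD 0

def f (n : Int) : Int :=
  let s : List Int := (PySem.Int.toChars n).map chInt
  let s1 : Int := s.foldl (fun s1 a => if PySem.Int.mod a 2 == 0 then s1 + a else s1) 0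
  let d : List Char := PySem.Int.toChars n
  let s2 : Int := (((PySem.List.slice? d none none 2).getD []).map chInt).sum
  |s1 - s2|

-- ===== PORT B =====
-- the loop body of Source B: v = int(ch); add v to s1 if v is even, to s2 if the index is even
def stepB (p : Int × Int) (ic : Int × Char) : Int × Int :=
  let v := chInt ic.2
  (if PySem.Int.mod v 2 == 0 then p.1 + v else p.1,
   if PySem.Int.mod ic.1 2 == 0 then p.2 + v else p.2)

def f_alt (n : Int) : Int :=
  let p : Int × Int := (PySem.List.enumerate (PySem.Int.toChars n) 0).foldl stepB (0, 0)
  |p.1 - p.2|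

-- ===== PRECONDITION & SPEC =====
-- Pre_f excludes negative n: there str(n) starts with '-' and A's int('-') raises ValueError.
def Pre_f (n : Int) : Prop := 0 ≤ n
instance (n : Int) : Decidable (Pre_f n) := by unfold Pre_f; infer_instance
def pvWitness_f : Int := 274

def Spec_f (n : Int) (out : Int) : Prop := out = f_alt n
instance (n : Int) (out : Int) : Decidable (Spec_f n out) := by unfold Spec_f; infer_instance

-- ===== CLAIM (what is proved, stated in full; the proofs are below) =====
def Claim_equal_f : Prop := ∀ (n : Int), Dom_f n → Pre_f n → Spec_f n (f n)

-- ===== LEMMAS AND PROOFS =====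

-- sum of those digits whose value is even
def e1 : List Char → Int
  | [] => 0
  | c :: t => (if PySem.Int.mod (chInt c) 2 == 0 then chInt c else 0) + e1 t

-- sums of digits at even / odd positions
mutual
def eo : List Char → Int
  | [] => 0
  | c :: t => chInt c + oo t
def oo : List Char → Int
  | [] => 0
  | _ :: t => eo t
end

-- the elements at even indices
def everyOther {α : Type} : List α → List α
  | [] => []
  | [a] => [a]
  | a :: _ :: t => a :: everyOther t

theorem foldA (cs : List Char) (x : Int) :
    (cs.map chInt).foldl (fun s1 a => if PySem.Int.mod a 2 == 0 then s1 + a else s1) x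
      = x + e1 cs := by
  induction cs generalizing x with
  | nil => simp [e1]
  | cons c t ih =>
    simp only [List.map_cons, List.foldl_cons, e1]
    split <;> rw [ih] <;> ring

theorem foldB (cs : List Char) (i : Int) (p : Int × Int) :
    (PySem.List.enumerate cs i).foldl stepB p
      = (p.1 + e1 cs, p.2 + (if PySem.Int.mod i 2 == 0 then eo cs else oo cs)) := by
  induction cs generalizing i p with
  | nil => simp [PySem.List.enumerate_nil, e1, eo, oo]
  | cons c t ih =>
    rw [PySem.List.enumerate_cons, List.foldl_cons, ih]
    by_cases h : (2:Int) ∣ i <;>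
      · simp [stepB, e1, eo, oo, h]
        split_ifs <;> omega

theorem sum_everyOther (cs : List Char) :
    ((everyOther cs).map chInt).sum = eo cs := by
  induction cs using everyOther.induct with
  | case1 => simp [everyOther, eo]
  | case2 a => simp [everyOther, eo, oo]
  | case3 a b t ih => simp [everyOther, eo, oo, ih]

theorem slice2 {α : Type} (xs : List α) :
    PySem.List.slice? xs none none 2 = some (everyOther xs) := by
  induction xs using everyOther.induct with
  | case1 => simp [PySem.List.slice?, PySem.List.sliceIndices, everyOther]
  | case2 a => simp [PySem.List.slice?, PySem.List.sliceIndices, everyOther]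
  | case3 a b t ih =>
    simp only [PySem.List.slice?, PySem.List.sliceIndices,
      if_neg (by norm_num : ¬ (2:Int) = 0), Option.some.injEq] at ih ⊢
    norm_num at ih ⊢
    have hc1 : (if 0 < t.length then (((t.length:Int) + 2 - 1) / 2).toNat else 0)
        = (t.length + 1) / 2 := by split <;> omega
    have hc2 : (((t.length:Int) + 1 + 1 + 2 - 1) / 2).toNat = (t.length + 1) / 2 + 1 := by
      omega
    rw [hc1] at ih
    rw [if_pos (by positivity), hc2, List.range_succ_eq_map, List.filterMap_cons,
      List.filterMap_map]
    have hf : ∀ k : Nat, ((fun x : Nat => (a :: b :: t)[(2 * (x:Int)).toNat]?) ∘ Nat.succ) k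
        = t[(2 * (k:Int)).toNat]? := by
      intro k
      have h1 : (2 * ((Nat.succ k : Nat):Int)).toNat = 2 * k + 2 := by omega
      have h2 : (2 * ((k:Nat):Int)).toNat = 2 * k := by omega
      simp only [Function.comp, h1, h2]
      simp
    simp only [List.filterMap_congr (fun k _ => hf k), ih]
    simp [everyOther]

-- ===== VERDICT (by name: the statement is the Claim_ definition above) =====
theorem f_spec : Claim_equal_f := by
  intro n _ _
  unfold Spec_f f f_alt
  simp only [foldA, foldB, slice2, Option.getD_some, sum_everyOther]
  norm_num
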